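-- pv_equiv track=rewrite | github.com/MMV-Lab/mmv_im2im | mmv_im2im/proj_trainer_multishape.py | _k_from_strides
-- ===== SOURCE A (Python) =====
-- def _k_from_strides(strides) -> int:
--     """
--     Computes the minimum spatial divisibility k required by a UNet
--     whose encoder strides are ``strides`` (list of per-layer stride
--     lists, e.g. [[1,1],[2,2],[2,2],[2,2]]).
--
--     k = product of all strides along each spatial axis, then take
--     the maximum across axes (handles anisotropic downsampling).
--
--     Examples
--     --------
--     AttentionUnet strides=[1,2,2,2,2]         -> k = 2^4 = 16
--     DynUNet 6 DS  strides=[[1,1],[2,2]x6]     -> k = 2^6 = 64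
--     """
--     # Normalise: accept both flat [1,2,2,2] and nested [[1,1],[2,2],...]
--     if not isinstance(strides[0], (list, tuple)):
--         strides = [[s] for s in strides]
--
--     n_dims = len(strides[0])
--     k_per_dim = [1] * n_dims
--     for stride_layer in strides:
--         for i, s in enumerate(stride_layer):
--             k_per_dim[i] *= s
--     return int(max(k_per_dim))
-- ===== SOURCE B (Python) =====
-- def _k_from_strides(strides) -> int:
--     # Divide-and-conquer: pad layers to a rectangle, reduce the layer range by
--     # binary splitting with elementwise (zip) multiplication, then take the max.
--     # Normalise: accept both flat [1,2,2,2] and nested [[1,1],[2,2],...]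
--     if not isinstance(strides[0], (list, tuple)):
--         strides = [[s] for s in strides]
--
--     n = len(strides[0])
--     padded = [list(layer) + [1] * (n - len(layer)) for layer in strides]
--
--     def reduce_range(lo, hi):
--         if hi - lo == 1:
--             return padded[lo]
--         mid = (lo + hi) // 2
--         return [x * y for x, y in zip(reduce_range(lo, mid), reduce_range(mid, hi))]
--
--     return int(max(reduce_range(0, len(padded))))
-- ===== Notes on version B (the rewrite author's own statement) =====
-- stated objective: alternative
-- what changed: B first pads the layers into a rectangle, then reduces the layer range by divide-and-conquer (binary splitting, combining halves with elementwise zip multiplication) and takes the max of the combined vector, instead of A's single left-to-right loop mutating a per-dim accumulator with enumerate.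
import Mathlib
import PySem

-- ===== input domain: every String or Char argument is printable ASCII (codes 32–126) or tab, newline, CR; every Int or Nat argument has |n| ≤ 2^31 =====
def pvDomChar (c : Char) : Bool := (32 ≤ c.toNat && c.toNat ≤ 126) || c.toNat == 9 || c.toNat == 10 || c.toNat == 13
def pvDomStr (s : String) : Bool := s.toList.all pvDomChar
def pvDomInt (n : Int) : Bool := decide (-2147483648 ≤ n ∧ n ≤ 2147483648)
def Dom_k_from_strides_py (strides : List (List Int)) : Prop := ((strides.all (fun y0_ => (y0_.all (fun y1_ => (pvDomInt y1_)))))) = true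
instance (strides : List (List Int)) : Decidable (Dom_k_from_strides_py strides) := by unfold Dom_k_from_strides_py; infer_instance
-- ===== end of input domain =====

-- ===== PORT A =====
-- B pads the layers into a rectangle and reduces them by divide-and-conquer with elementwise products (alternative decomposition; same cost).
def k_from_strides_py (strides : List (List Int)) : Int :=
  -- In Lean the argument is always List (List Int), so A's isinstance-normalisation branch is a no-op.
  let kInit : List Int := List.replicate (strides.headD []).length 1
  let kFinal := strides.foldl (fun k layer =>
    (PySem.List.enumerate layer).foldl
      (fun k p => PySem.List.pySetD k p.1 (PySem.List.pyGetD k p.1 1 * p.2)) k) kInit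
  (PySem.List.max? kFinal (fun y => y)).getD 0   -- max(k_per_dim); total form, Pre_ keeps kFinal nonempty

-- ===== PORT B =====
def pvPad (n : Nat) (layer : List Int) : List Int :=
  layer ++ List.replicate (n - layer.length) 1

-- reduce_range from Source B: binary split of the layer range, zip-multiply the halves.
-- (The `hi - lo ≤ 1` guard only totalises the empty range, which Source B never reaches.)
def pvReduceRange (padded : List (List Int)) (lo hi : Nat) : List Int :=
  if hi - lo ≤ 1 then padded.getD lo []
  else
    let mid := (lo + hi) / 2
    List.zipWith (· * ·) (pvReduceRange padded lo mid) (pvReduceRange padded mid hi)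
termination_by hi - lo
decreasing_by all_goals omega

def k_from_strides_py_alt (strides : List (List Int)) : Int :=
  let n := (strides.headD []).length
  let padded := strides.map (pvPad n)
  (PySem.List.max? (pvReduceRange padded 0 padded.length) (fun y => y)).getD 0  -- int(max(...)); Pre_ keeps it nonempty

-- ===== PRECONDITION & SPEC =====
-- Pre_ is exactly A's return domain: A raises IndexError on an empty strides list and when a
-- layer is longer than the first, and ValueError (max of empty) when the first layer is empty.
def Pre_k_from_strides_py (strides : List (List Int)) : Prop :=
  strides ≠ [] ∧ 0 < (strides.headD []).length ∧
    (strides.all (fun l => l.length ≤ (strides.headD []).length)) = true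
instance (strides : List (List Int)) : Decidable (Pre_k_from_strides_py strides) := by
  unfold Pre_k_from_strides_py; infer_instance
def pvWitness_k_from_strides_py : List (List Int) := [[1, 1], [2, 2], [2, 2]]

def Spec_k_from_strides_py (strides : List (List Int)) (out : Int) : Prop := out = k_from_strides_py_alt strides
instance (strides : List (List Int)) (out : Int) : Decidable (Spec_k_from_strides_py strides out) := by unfold Spec_k_from_strides_py; infer_instance

-- ===== CLAIM (what is proved, stated in full; the proofs are below) =====
def Claim_equal_k_from_strides_py : Prop := ∀ (strides : List (List Int)), Dom_k_from_strides_py strides → Pre_k_from_strides_py strides → Spec_k_from_strides_py strides (k_from_strides_py strides)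

-- ===== LEMMAS AND PROOFS =====

-- per-axis product as a map-then-prod (the common spec both ports are reduced to)
def pvColP (i : Nat) (ls : List (List Int)) : Int :=
  (ls.map (fun l => if i < l.length then l.getD i 1 else 1)).prod

lemma pv_inner_fold (layer : List Int) : ∀ (k : List Int) (s : Nat),
    s + layer.length ≤ k.length →
    (let r := (PySem.List.enumerate layer (s : Int)).foldl
        (fun acc p => PySem.List.pySetD acc p.1 (PySem.List.pyGetD acc p.1 1 * p.2)) k
     r.length = k.length ∧ ∀ i : Nat,
       r.getD i 1 = k.getD i 1 * (if s ≤ i ∧ i < s + layer.length then layer.getD (i - s) 1 else 1)) := by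
  induction layer with
  | nil =>
    intro k s _
    refine ⟨by simp [PySem.List.enumerate_nil], fun i => ?_⟩
    have : ¬ (s ≤ i ∧ i < s + 0) := by omega
    simp [PySem.List.enumerate_nil]
  | cons x xs ih =>
    intro k s hlen
    simp only [List.length_cons] at hlen
    have hs : s < k.length := by omega
    have hstep : (PySem.List.enumerate (x :: xs) (s : Int)).foldl
        (fun acc p => PySem.List.pySetD acc p.1 (PySem.List.pyGetD acc p.1 1 * p.2)) k
        = (PySem.List.enumerate xs ((s + 1 : Nat) : Int)).foldl
        (fun acc p => PySem.List.pySetD acc p.1 (PySem.List.pyGetD acc p.1 1 * p.2))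
        (k.set s (k.getD s 1 * x)) := by
      simp [PySem.List.enumerate_cons, PySem.List.pySetD_natCast, PySem.List.pyGetD_natCast]
    have hlen' : (s + 1) + xs.length ≤ (k.set s (k.getD s 1 * x)).length := by
      simp; omega
    obtain ⟨ihlen, ihget⟩ := ih (k.set s (k.getD s 1 * x)) (s + 1) hlen'
    have hset : ∀ i : Nat, (k.set s (k.getD s 1 * x)).getD i 1
        = if i = s then k.getD s 1 * x else k.getD i 1 := by
      intro i
      by_cases h : i = s
      · simp [h, List.getD, hs]
      · simp [List.getD, h, Ne.symm h]
    refine ⟨?_, fun i => ?_⟩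
    · rw [hstep]; simpa using ihlen
    · rw [hstep, ihget i, hset i]
      simp only [List.length_cons]
      by_cases h : i = s
      · have h1 : ¬ (s + 1 ≤ i ∧ i < s + 1 + xs.length) := by omega
        rw [if_pos h, if_neg h1, if_pos (show s ≤ i ∧ i < s + (xs.length + 1) by omega)]
        have h0 : i - s = 0 := by omega
        rw [h0]
        simp [h]
      · rw [if_neg h]
        by_cases h2 : s ≤ i ∧ i < s + (xs.length + 1)
        · have h3 : s + 1 ≤ i ∧ i < s + 1 + xs.length := by omega
          rw [if_pos h2, if_pos h3]
          have h4 : i - s = (i - (s + 1)) + 1 := by omega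
          rw [h4, List.getD_cons_succ]
        · have h3 : ¬ (s + 1 ≤ i ∧ i < s + 1 + xs.length) := by omega
          rw [if_neg h2, if_neg h3]

lemma pv_outer_fold : ∀ (ls : List (List Int)) (k : List Int),
    (∀ l ∈ ls, l.length ≤ k.length) →
    (let r := ls.foldl (fun k layer =>
        (PySem.List.enumerate layer).foldl
          (fun acc p => PySem.List.pySetD acc p.1 (PySem.List.pyGetD acc p.1 1 * p.2)) k) k
     r.length = k.length ∧ ∀ i : Nat, r.getD i 1 = k.getD i 1 * pvColP i ls) := by
  intro ls
  induction ls with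
  | nil => intro k _; exact ⟨rfl, fun i => by simp [pvColP]⟩
  | cons l t ih =>
    intro k hl
    have hl0 : l.length ≤ k.length := hl l (by simp)
    have hinner := pv_inner_fold l k 0 (by omega)
    simp only [Nat.cast_zero] at hinner
    obtain ⟨h1len, h1get⟩ := hinner
    simp only [Nat.zero_add, Nat.sub_zero] at h1get
    set k1 := (PySem.List.enumerate l).foldl
        (fun acc p => PySem.List.pySetD acc p.1 (PySem.List.pyGetD acc p.1 1 * p.2)) k with hk1
    have hl' : ∀ m ∈ t, m.length ≤ k1.length := by
      intro m hm; rw [h1len]; exact hl m (by simp [hm])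
    obtain ⟨h2len, h2get⟩ := ih k1 hl'
    constructor
    · simpa only [List.foldl_cons] using h2len.trans h1len
    · intro i
      simp only [List.foldl_cons]
      rw [h2get i, h1get i]
      simp only [pvColP, List.map_cons, List.prod_cons]
      by_cases h : i < l.length
      · have h0 : (0 ≤ i ∧ i < l.length) := ⟨Nat.zero_le i, h⟩
        rw [if_pos h0, if_pos h]
        show k.getD i 1 * l.getD i 1 * pvColP i t = _
        unfold pvColP
        ring
      · have h0 : ¬ (0 ≤ i ∧ i < l.length) := by omega
        rw [if_neg h0, if_neg h]
        show k.getD i 1 * 1 * pvColP i t = _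
        unfold pvColP
        ring

-- column-segment product over layers lo..hi-1 of the padded rectangle
def pvColSeg (padded : List (List Int)) (lo hi i : Nat) : Int :=
  ((List.range' lo (hi - lo)).map (fun j => (padded.getD j []).getD i 1)).prod

lemma pv_reduce_range (padded : List (List Int)) (n : Nat)
    (hrect : ∀ l ∈ padded, l.length = n) :
    ∀ d lo hi, hi - lo = d → lo < hi → hi ≤ padded.length →
      pvReduceRange padded lo hi = (List.range n).map (fun i => pvColSeg padded lo hi i) := by
  intro d
  induction d using Nat.strong_induction_on with
  | _ d ih =>
    intro lo hi hd hlt hle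
    by_cases hbase : hi - lo ≤ 1
    · have hhi : hi = lo + 1 := by omega
      rw [pvReduceRange, if_pos hbase]
      have hlo : lo < padded.length := by omega
      have hlen : (padded.getD lo []).length = n := by
        have := hrect (padded.getD lo []) (by
          rw [List.getD_eq_getElem?_getD, List.getElem?_eq_getElem hlo]
          exact List.getElem_mem _)
        exact this
      simp only [List.getD_eq_getElem?_getD] at hlen ⊢
      apply List.ext_getElem
      · simp [hlen]
      · intro i h1 h2
        simp only [List.getElem_map, List.getElem_range]
        unfold pvColSeg
        rw [hhi]
        simp only [Nat.add_sub_cancel_left, List.range'_one, List.map_cons, List.map_nil,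
          List.prod_cons, List.prod_nil, mul_one, List.getD_eq_getElem?_getD]
        exact (List.getElem?_eq_getElem h1).symm ▸ rfl
    · rw [pvReduceRange, if_neg hbase]
      have h2 : 2 ≤ hi - lo := by omega
      have hm1 : lo < (lo + hi) / 2 := by omega
      have hm2 : (lo + hi) / 2 < hi := by omega
      have e1 := ih ((lo + hi) / 2 - lo) (by omega) lo ((lo + hi) / 2) rfl hm1 (by omega)
      have e2 := ih (hi - (lo + hi) / 2) (by omega) ((lo + hi) / 2) hi rfl hm2 hle
      show List.zipWith (· * ·) (pvReduceRange padded lo ((lo + hi) / 2))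
          (pvReduceRange padded ((lo + hi) / 2) hi)
        = List.map (fun i => pvColSeg padded lo hi i) (List.range n)
      rw [e1, e2]
      apply List.ext_getElem
      · simp
      · intro i h1' h2'
        have hi' : i < n := by
          simp only [List.length_zipWith, List.length_map, List.length_range] at h1'
          omega
        simp only [List.getElem_zipWith, List.getElem_map, List.getElem_range]
        unfold pvColSeg
        have hsplit : List.range' lo (hi - lo)
            = List.range' lo ((lo + hi) / 2 - lo) ++ List.range' ((lo + hi) / 2) (hi - (lo + hi) / 2) := by
          have h3 : hi - lo = ((lo + hi) / 2 - lo) + (hi - (lo + hi) / 2) := by omega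
          rw [h3, ← List.range'_append]
          have h5 : lo + 1 * ((lo + hi) / 2 - lo) = (lo + hi) / 2 := by omega
          rw [h5]
        rw [hsplit, List.map_append, List.prod_append]

lemma pvColSeg_full (padded : List (List Int)) (i : Nat) :
    pvColSeg padded 0 padded.length i = (padded.map (fun l => l.getD i 1)).prod := by
  unfold pvColSeg
  congr 1
  apply List.ext_getElem
  · simp
  · intro j h1 h2
    simp only [List.length_map, List.length_range'] at h1
    simp [List.getD_eq_getElem?_getD, List.getElem?_eq_getElem (by simpa using h1 : j < padded.length)]

lemma pvPad_getD (n : Nat) (l : List Int) (i : Nat) (hi : i < n) (hl : l.length ≤ n) :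
    (pvPad n l).getD i 1 = if i < l.length then l.getD i 1 else 1 := by
  unfold pvPad
  by_cases h : i < l.length
  · rw [if_pos h]
    simp [List.getD_eq_getElem?_getD, List.getElem?_append_left h]
  · rw [if_neg h]
    rw [List.getD_eq_getElem?_getD, List.getElem?_append_right (by omega)]
    simp only [List.getElem?_replicate]
    split <;> simp

theorem k_from_strides_py_spec : Claim_equal_k_from_strides_py := by
  intro strides _ hpre
  obtain ⟨hne, hn, hall⟩ := hpre
  unfold Spec_k_from_strides_py
  show k_from_strides_py strides = k_from_strides_py_alt strides
  set n := (strides.headD []).length with hn_def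
  have hall' : ∀ l ∈ strides, l.length ≤ n := by
    intro l hl; exact of_decide_eq_true (List.all_eq_true.mp hall l hl)
  -- A side
  obtain ⟨hlen, hget⟩ := pv_outer_fold strides (List.replicate n 1)
    (by intro l hl; simpa using hall' l hl)
  set kF := strides.foldl (fun k layer =>
      (PySem.List.enumerate layer).foldl
        (fun acc p => PySem.List.pySetD acc p.1 (PySem.List.pyGetD acc p.1 1 * p.2)) k)
      (List.replicate n 1) with hkF
  have hlenF : kF.length = n := by simpa using hlen
  have hrep : ∀ i : Nat, (List.replicate n (1 : Int)).getD i 1 = 1 := by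
    intro i
    by_cases hi : i < n
    · simp [List.getD_eq_getElem?_getD, hi]
    · simp [List.getD_eq_getElem?_getD, hi]
  have hgetF : ∀ i : Nat, kF.getD i 1 = pvColP i strides := by
    intro i
    rw [hget i, hrep i, one_mul]
  have hkFeq : kF = (List.range n).map (fun i => pvColP i strides) := by
    apply List.ext_getElem
    · simpa [hlenF]
    · intro i hi hi'
      have hin : i < n := by simpa [hlenF] using hi
      have := hgetF i
      rw [List.getD_eq_getElem?_getD, List.getElem?_eq_getElem hi] at this
      simp at this
      simp [this]
  -- B side
  set padded := strides.map (pvPad n) with hpadded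
  have hrect : ∀ l ∈ padded, l.length = n := by
    intro l hl
    rw [hpadded] at hl
    obtain ⟨l0, hl0, rfl⟩ := List.mem_map.mp hl
    have := hall' l0 hl0
    simp [pvPad]
    omega
  have hplen : padded.length = strides.length := by simp [hpadded]
  have hpos : 0 < padded.length := by
    rw [hplen]; exact List.length_pos_of_ne_nil hne
  have hred := pv_reduce_range padded n hrect (padded.length - 0) 0 padded.length rfl hpos le_rfl
  have hcol : ∀ i : Nat, i < n → pvColSeg padded 0 padded.length i = pvColP i strides := by
    intro i hi
    rw [pvColSeg_full]
    unfold pvColP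
    congr 1
    rw [hpadded, List.map_map]
    apply List.map_congr_left
    intro l hl
    exact pvPad_getD n l i hi (hall' l hl)
  have hreq : pvReduceRange padded 0 padded.length = (List.range n).map (fun i => pvColP i strides) := by
    rw [hred]
    apply List.map_congr_left
    intro i hi
    exact hcol i (List.mem_range.mp hi)
  show (PySem.List.max? kF (fun y => y)).getD 0
      = (PySem.List.max? (pvReduceRange padded 0 padded.length) (fun y => y)).getD 0
  rw [hkFeq, hreq]
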